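-- pv_equiv track=rewrite | github.com/AP-MI-2021/lab-4-flaviucristi | main.py | numerepoznumereneg
-- ===== SOURCE A (Python) =====
-- def cmmdcauneiliste(list):
--     """
--     Determina cmmdc a numerelor dintr-o lista
--     :param list: numere intregi
--     :return: cmmdc-ul numerelor
--     """
--     d=0
--     for i in list:
--         imp=i
--         while imp!=0:
--             r=d%imp
--             d=imp
--             imp=r
--     return d
--
-- def invernumarnegativ(n):
--     """
--     Determina oglinditul unui numar negativ
--     :param n: numar intreg
--     :return: oglinditul numarului
--     """
--     ogl=0
--     nr=abs(n)
--     while nr>0: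
--         ogl=ogl*10+nr%10
--         nr=nr//10
--     return -ogl
--
-- def numerepoznumereneg(list):
--     """
--     Determina o lista in care numerele pozitive si nenule au fost inlocuite cu CMMDC-ul lor , iar numerele negative cu cifrele in ordine inversa
--     :param list: numere intregi
--     :return: lista in care numerele pozitive si nenule au fost inlocuite cu CMMDC-ul lor, iar numerele negative cu cifrele in ordine inversa
--     """
--     rez=[]
--     poz=[]
--     for i in list:
--         if i>=0:
--             poz.append(i)
--     cmmdc=cmmdcauneiliste(poz)
--     for i in list:
--         if i>=0:
--             rez.append(cmmdc)
--         else: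
--             invers=invernumarnegativ(i)
--             rez.append(invers)
--     return rez
-- ===== SOURCE B (Python) =====
-- def numerepoznumereneg(list):
--     """Single pass gcd fold + comprehension; negatives reversed via string slicing."""
--     def gcd(a, b):
--         return a if b == 0 else gcd(b, a % b)
--     g = 0
--     for i in list:
--         if i >= 0:
--             g = gcd(g, i)
--     def oglindit(n):
--         v = 0
--         for ch in str(-n)[::-1]:
--             v = v * 10 + (ord(ch) - 48)
--         return -v
--     return [g if i >= 0 else oglindit(i) for i in list]
-- ===== Notes on version B (the rewrite author's own statement) =====
-- stated objective: alternative
-- what changed: B folds a recursive gcd over the list in one pass (no intermediate list of non-negatives) and builds the result as a comprehension, reversing a negative's digits via string slicing (str(-i)[::-1]) instead of A's arithmetic %10//10 accumulation loop.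
import Mathlib
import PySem

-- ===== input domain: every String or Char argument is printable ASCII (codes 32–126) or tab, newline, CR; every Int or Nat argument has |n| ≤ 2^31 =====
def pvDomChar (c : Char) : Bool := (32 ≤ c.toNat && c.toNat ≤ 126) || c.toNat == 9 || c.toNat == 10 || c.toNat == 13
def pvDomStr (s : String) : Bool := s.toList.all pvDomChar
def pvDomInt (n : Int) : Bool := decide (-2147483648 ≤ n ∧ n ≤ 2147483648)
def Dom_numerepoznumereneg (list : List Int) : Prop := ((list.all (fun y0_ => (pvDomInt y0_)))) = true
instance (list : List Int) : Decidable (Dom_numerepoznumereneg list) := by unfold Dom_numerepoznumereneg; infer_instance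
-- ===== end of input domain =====

-- B replaces A's two-pass collect-then-map with a one-pass recursive-gcd fold plus a
-- comprehension, and reverses a negative's digits via string slicing instead of a %10//10 loop
-- (objective: alternative, same complexity).

-- Python's a % b keeps the divisor's sign, so |a % b| < |b| for b ≠ 0
-- (cited by the ports' termination proofs).
theorem pyModNatAbsLt (d imp : Int) (h : imp ≠ 0) :
    (PySem.Int.mod d imp).natAbs < imp.natAbs := by
  rcases lt_or_gt_of_ne h with hneg | hpos
  · have := PySem.Int.mod_neg_bounds d hneg; omega
  · have h1 := PySem.Int.mod_nonneg d hpos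
    have h2 := PySem.Int.mod_lt d hpos
    omega

-- ===== PORT A =====
-- the inner `while imp != 0: r = d % imp; d = imp; imp = r` of cmmdcauneiliste
def euclidGo (d imp : Int) : Int :=
  if h : imp = 0 then d
  else euclidGo imp (PySem.Int.mod d imp)
termination_by imp.natAbs
decreasing_by exact pyModNatAbsLt d imp h

def cmmdcauneiliste (l : List Int) : Int :=
  l.foldl (fun d i => euclidGo d i) 0

-- the `while nr > 0: ogl = ogl*10 + nr%10; nr = nr//10` of invernumarnegativ
def invGo (nr ogl : Int) : Int :=
  if h : 0 < nr then
    invGo (PySem.Int.floordiv nr 10) (ogl * 10 + PySem.Int.mod nr 10)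
  else ogl
termination_by nr.toNat
decreasing_by
  rw [PySem.Int.floordiv_eq_ediv_of_pos (by norm_num : (0:Int) < 10)]
  omega

def invernumarnegativ (n : Int) : Int :=
  -(invGo (Int.natAbs n : Int) 0)

def numerepoznumereneg (list : List Int) : List Int :=
  let poz := list.foldl (fun poz i => if 0 ≤ i then poz ++ [i] else poz) ([] : List Int)
  let cmmdc := cmmdcauneiliste poz
  list.foldl
    (fun rez i => if 0 ≤ i then rez ++ [cmmdc] else rez ++ [invernumarnegativ i])
    ([] : List Int)

-- ===== PORT B =====
-- def gcd(a, b): return a if b == 0 else gcd(b, a % b)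
def bgcd (a b : Int) : Int :=
  if h : b = 0 then a else bgcd b (PySem.Int.mod a b)
termination_by b.natAbs
decreasing_by exact pyModNatAbsLt a b h

-- v = 0; for ch in str(-n)[::-1]: v = v*10 + (ord(ch) - 48); return -v
-- (s[::-1] is the reverse of the characters, PySem.Str.slice?_none_none_neg_one)
def oglindit (n : Int) : Int :=
  -(((PySem.Int.toChars (-n)).reverse).foldl
      (fun v c => v * 10 + ((c.toNat : Int) - 48)) 0)

def numerepoznumereneg_alt (list : List Int) : List Int :=
  let g := list.foldl (fun g i => if 0 ≤ i then bgcd g i else g) 0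
  list.map (fun i => if 0 ≤ i then g else oglindit i)

-- ===== PRECONDITION & SPEC =====
def Spec_numerepoznumereneg (list : List Int) (out : List Int) : Prop := out = numerepoznumereneg_alt list
instance (list : List Int) (out : List Int) : Decidable (Spec_numerepoznumereneg list out) := by unfold Spec_numerepoznumereneg; infer_instance

-- ===== CLAIM (what is proved, stated in full; the proofs are below) =====
def Claim_equal_numerepoznumereneg : Prop := ∀ (list : List Int), Dom_numerepoznumereneg list → Spec_numerepoznumereneg list (numerepoznumereneg list)

-- ===== LEMMAS AND PROOFS =====

-- A's hand-rolled Euclid loop and B's recursive gcd compute the same value.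
theorem euclidGo_eq_bgcd (d i : Int) : euclidGo d i = bgcd d i := by
  by_cases h : i = 0
  · rw [euclidGo, bgcd]; simp [h]
  · rw [euclidGo, bgcd]; simp only [h, dite_false]
    exact euclidGo_eq_bgcd i (PySem.Int.mod d i)
termination_by i.natAbs
decreasing_by exact pyModNatAbsLt d i h

-- folding bgcd only over the non-negative elements = filtering then folding
theorem foldl_bgcd_filter (xs : List Int) (a : Int) :
    List.foldl (fun g i => if 0 ≤ i then bgcd g i else g) a xs
      = List.foldl (fun d i => bgcd d i) a (xs.filter (fun i => decide (0 ≤ i))) := by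
  induction xs generalizing a with
  | nil => rfl
  | cons x xs ih => by_cases hx : 0 ≤ x <;> simp [hx, ih]

-- A's gcd of its collected non-negative list equals B's single-pass gcd fold
theorem cmmdc_eq_g (list : List Int) :
    cmmdcauneiliste
        (list.foldl (fun poz i => if 0 ≤ i then poz ++ [i] else poz) ([] : List Int))
      = list.foldl (fun g i => if 0 ≤ i then bgcd g i else g) 0 := by
  have h1 : (fun (poz : List Int) (i : Int) => if 0 ≤ i then poz ++ [i] else poz)
      = (fun (poz : List Int) (i : Int) =>
          if (fun j : Int => decide (0 ≤ j)) i = true then poz ++ [id i] else poz) := by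
    funext poz i; simp
  rw [h1, PySem.List.foldl_append_if, foldl_bgcd_filter]
  simp [cmmdcauneiliste, euclidGo_eq_bgcd]

-- toDigitsCore threads its accumulator on the right
theorem toDigitsCore_append (f : Nat) : ∀ (n : Nat) (acc : List Char),
    Nat.toDigitsCore 10 f n acc = Nat.toDigitsCore 10 f n [] ++ acc := by
  induction f with
  | zero => intro n acc; simp [Nat.toDigitsCore]
  | succ f ih =>
    intro n acc
    simp only [Nat.toDigitsCore]
    by_cases h : n / 10 = 0
    · simp [h]
    · simp only [h, if_false]
      rw [ih (n / 10) (Nat.digitChar (n % 10) :: acc), ih (n / 10) [Nat.digitChar (n % 10)],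
        List.append_assoc]
      rfl

-- str(m) for m : Nat is '0' or the base-10 digits (Nat.digits) most-significant first
theorem toDigitsCore_eq_digits (n : Nat) : ∀ (f : Nat), n < f →
    Nat.toDigitsCore 10 f n []
      = (if n = 0 then ['0'] else ((Nat.digits 10 n).map Nat.digitChar).reverse) := by
  induction n using Nat.strong_induction_on with
  | _ n ih =>
    intro f hf
    obtain ⟨f', rfl⟩ : ∃ f', f = f' + 1 := ⟨f - 1, by omega⟩
    simp only [Nat.toDigitsCore]
    by_cases h0 : n = 0
    · subst h0; norm_num; rfl
    · by_cases h : n / 10 = 0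
      · simp only [h, if_true, h0, if_false]
        rw [Nat.digits_def' (by norm_num : 1 < 10) (Nat.pos_of_ne_zero h0), h]
        simp
      · simp only [h, if_false, h0]
        rw [toDigitsCore_append, ih (n / 10) (by omega) f' (by omega)]
        simp only [h, if_false]
        rw [Nat.digits_def' (by norm_num : 1 < 10) (Nat.pos_of_ne_zero h0)]
        simp

-- A's arithmetic reversal loop is the fold of v*10+d over the base-10 digits (LSB first)
theorem invGo_eq_digits_fold (m : Nat) : ∀ (acc : Int),
    invGo (m : Int) acc
      = (Nat.digits 10 m).foldl (fun (v : Int) (d : Nat) => v * 10 + (d : Int)) acc := by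
  induction m using Nat.strong_induction_on with
  | _ m ih =>
    intro acc
    rw [invGo]
    by_cases h0 : m = 0
    · subst h0; norm_num
    · have hm : (0 : Int) < (m : Int) := by exact_mod_cast Nat.pos_of_ne_zero h0
      simp only [hm, dite_true]
      rw [show (10 : Int) = ((10 : Nat) : Int) from rfl,
        PySem.Int.floordiv_natCast, PySem.Int.mod_natCast,
        ih (m / 10) (Nat.div_lt_self (Nat.pos_of_ne_zero h0) (by norm_num)),
        Nat.digits_def' (by norm_num : 1 < 10) (Nat.pos_of_ne_zero h0)]
      simp

-- B's character fold over the reversed decimal string equals the digit fold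
theorem char_fold_eq_digit_fold (ds : List Nat) (hds : ∀ d ∈ ds, d < 10) (a : Int) :
    (ds.map Nat.digitChar).foldl (fun v c => v * 10 + ((c.toNat : Int) - 48)) a
      = ds.foldl (fun (v : Int) (d : Nat) => v * 10 + (d : Int)) a := by
  rw [List.foldl_map]
  refine PySem.List.foldl_congr_mem ds _ _ a ?_
  intro acc d hd
  have h10 := hds d hd
  have : ((Nat.digitChar d).toNat : Int) - 48 = (d : Int) := by
    interval_cases d <;> decide
  rw [this]

-- on negative inputs the two reversals agree
theorem invern_eq_oglindit (i : Int) (hi : i < 0) :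
    invernumarnegativ i = oglindit i := by
  obtain ⟨m, hm⟩ : ∃ m : Nat, -i = (m : Int) :=
    ⟨(-i).toNat, by omega⟩
  have hm0 : m ≠ 0 := by omega
  have hna : (Int.natAbs i : Int) = (m : Int) := by omega
  rw [invernumarnegativ, oglindit, hna, hm]
  have htc : PySem.Int.toChars (m : Int) = Nat.toDigits 10 m := by
    simp [PySem.Int.toChars]
  rw [htc, Nat.toDigits, toDigitsCore_eq_digits m (m + 1) (by omega)]
  simp only [hm0, if_false, List.reverse_reverse]
  rw [char_fold_eq_digit_fold _ (fun d hd => Nat.digits_lt_base (by norm_num) hd),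
    invGo_eq_digits_fold]

-- ===== VERDICT (by name: the statement is the Claim_ definition above) =====
theorem numerepoznumereneg_spec : Claim_equal_numerepoznumereneg := by
  intro list _
  unfold Spec_numerepoznumereneg numerepoznumereneg numerepoznumereneg_alt
  simp only []
  have hstep : (fun (rez : List Int) (i : Int) =>
      if 0 ≤ i then
        rez ++ [cmmdcauneiliste
          (list.foldl (fun poz i => if 0 ≤ i then poz ++ [i] else poz) ([] : List Int))]
      else rez ++ [invernumarnegativ i])
      = (fun (rez : List Int) (i : Int) =>
          rez ++ [if 0 ≤ i then
            list.foldl (fun g i => if 0 ≤ i then bgcd g i else g) 0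
          else oglindit i]) := by
    funext rez i
    by_cases hi : 0 ≤ i
    · simp [hi, cmmdc_eq_g]
    · simp [hi, invern_eq_oglindit i (by omega)]
  rw [hstep, PySem.List.foldl_append_singleton_eq_map]
  simp
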